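-- pv_equiv track=rewrite | github.com/morawi/MLPHOC | utils/some_functions.py | word_to_label
-- ===== SOURCE A (Python) =====
-- def word_to_label(word_str):
--     """Example:
--     x= ['hello', 'John', 'hi', 'John', 'hello', 'pumpum']
--     output should be something like this:
--     y=[0, 1, 2, 1, 0, 3] """
--
--     d = {};  count = 0
--
--     for i in word_str:
--       if i not in d:
--          d[i] = count
--          count += 1
--
--     labels = [d[i] for i in word_str]
--
--     return labels
-- ===== SOURCE B (Python) =====
-- def word_to_label(word_str):
--     """Closed form: the label of w is the number of distinct words strictly
--     before w's first occurrence."""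
--     return [len(set(word_str[:word_str.index(w)])) for w in word_str]
-- ===== Notes on version B (the rewrite author's own statement) =====
-- stated objective: simpler
-- what changed: Drops the stateful dict-and-counter construction entirely: each label is computed by a closed form, len(set(prefix before the word's first occurrence)), trading the O(n) table build for a one-line per-element formula (O(n^2) total).
import Mathlib
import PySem

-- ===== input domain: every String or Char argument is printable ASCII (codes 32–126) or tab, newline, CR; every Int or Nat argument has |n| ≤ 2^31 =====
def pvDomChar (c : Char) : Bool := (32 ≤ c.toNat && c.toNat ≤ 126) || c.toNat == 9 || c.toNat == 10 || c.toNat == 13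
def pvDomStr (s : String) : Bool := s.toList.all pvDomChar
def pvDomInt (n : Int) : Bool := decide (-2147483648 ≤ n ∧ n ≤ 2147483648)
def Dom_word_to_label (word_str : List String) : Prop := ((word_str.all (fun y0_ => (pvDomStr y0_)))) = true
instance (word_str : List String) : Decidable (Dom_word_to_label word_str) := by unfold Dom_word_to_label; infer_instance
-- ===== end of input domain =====

-- B replaces A's stateful dict-and-counter build (then a rescanning comprehension) by a
-- stateless closed form: label(w) = number of distinct words before w's first occurrence;
-- objective: simpler (B is slower asymptotically, O(n^2) vs O(n)).

-- ===== PORT A =====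
-- loop body of A: if i not in d: d[i] = count; count += 1
def stepA (s : PySem.Dict String Int × Int) (w : String) : PySem.Dict String Int × Int :=
  if s.1.contains w then s else (s.1.insert w s.2, s.2 + 1)

def word_to_label (word_str : List String) : List Int :=
  let d := (word_str.foldl stepA (PySem.Dict.empty, 0)).1
  -- d[i] in the comprehension: the key is always present (inserted in the loop), so KeyError is unreachable; getD is exact here
  word_str.map (fun i => d.getD i 0)

-- ===== PORT B =====
-- len(set(word_str[:word_str.index(w)])); index(w) always succeeds (w is drawn from word_str), so ValueError is unreachable and the getD 0 default is dead
def word_to_label_alt (word_str : List String) : List Int :=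
  word_str.map (fun w =>
    ((PySem.Set.ofList (PySem.List.slice word_str none
        (some (((PySem.List.index? word_str w).getD 0 : Nat) : Int)))).length : Int))

-- ===== PRECONDITION & SPEC =====
def Spec_word_to_label (word_str : List String) (out : List Int) : Prop := out = word_to_label_alt word_str
instance (word_str : List String) (out : List Int) : Decidable (Spec_word_to_label word_str out) := by unfold Spec_word_to_label; infer_instance

-- ===== CLAIM (what is proved, stated in full; the proofs are below) =====
def Claim_equal_word_to_label : Prop := ∀ (word_str : List String), Dom_word_to_label word_str → Spec_word_to_label word_str (word_to_label word_str)

-- ===== LEMMAS AND PROOFS =====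

-- index? of a member is `some` of its first index (glue between index? and idxOf)
theorem index?_of_mem (l : List String) (w : String) (h : w ∈ l) :
    PySem.List.index? l w = some (l.idxOf w) := by
  induction l with
  | nil => cases h
  | cons x t ih =>
    by_cases hx : x = w
    · subst hx
      rw [PySem.List.index?_cons_self, List.idxOf_cons_self]
    · have hw : w ∈ t := by
        rcases List.mem_cons.mp h with h' | h'
        · exact absurd h'.symm hx
        · exact h'
      rw [PySem.List.index?_cons_of_ne t hx, ih hw]
      simp [hx]

-- A's dict after processing ws, starting from a dict tabulating each word's index in `seen`,
-- tabulates each word's index in `Set.update seen ws` (first-occurrence order).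
theorem foldA_inv (ws : List String) (w : String) : ∀ (seen : List String) (d : PySem.Dict String Int),
    (∀ v, d.get? v = (PySem.List.index? seen v).map Int.ofNat) →
    ((ws.foldl stepA (d, (seen.length : Int))).1).get? w
      = (PySem.List.index? (PySem.Set.update seen ws) w).map Int.ofNat := by
  induction ws with
  | nil => intro seen d h; simpa using h w
  | cons x rest ih =>
    intro seen d h
    have hmem : d.contains x = decide (x ∈ seen) := by
      rw [PySem.Dict.contains_eq_isSome_get?, h x]
      by_cases hx : x ∈ seen
      · simp [Option.isSome_map, hx]
      · simp [hx]
    have hupd : PySem.Set.update seen (x :: rest) = PySem.Set.update (PySem.Set.add seen x) rest := rfl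
    rw [List.foldl_cons, hupd]
    by_cases hx : x ∈ seen
    · have hstep : stepA (d, (seen.length : Int)) x = (d, (seen.length : Int)) := by
        unfold stepA; rw [hmem]; simp [hx]
      have hadd : PySem.Set.add seen x = seen := by
        simp [PySem.Set.add, PySem.Set.contains, hx]
      rw [hstep, hadd]
      exact ih seen d h
    · have hstep : stepA (d, (seen.length : Int)) x
          = (d.insert x (seen.length : Int), (seen.length : Int) + 1) := by
        unfold stepA; rw [hmem]; simp [hx]
      have hadd : PySem.Set.add seen x = seen ++ [x] := by
        simp [PySem.Set.add, PySem.Set.contains, hx]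
      have h' : ∀ v, (d.insert x (seen.length : Int)).get? v
          = (PySem.List.index? (seen ++ [x]) v).map Int.ofNat := by
        intro v
        by_cases hvx : v = x
        · subst hvx
          rw [PySem.Dict.get?_insert_self, PySem.List.index?_append_singleton_self seen v hx]
          rfl
        · rw [PySem.Dict.get?_insert_of_ne d _ hvx, h v]
          by_cases hv : v ∈ seen
          · rw [PySem.List.index?_append_of_mem [x] hv]
          · rw [(PySem.List.index?_eq_none_iff seen v).mpr hv,
                (PySem.List.index?_eq_none_iff (seen ++ [x]) v).mpr (by
                  simp [hv, fun he => hvx he])]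
      have hlen : (seen.length : Int) + 1 = (((seen ++ [x]).length : Nat) : Int) := by
        simp
      rw [hstep, hadd, hlen]
      exact ih (seen ++ [x]) (d.insert x (seen.length : Int)) h'

-- ofList over a snoc is Set.add at the end
theorem ofList_append_singleton (l : List String) (y : String) :
    PySem.Set.ofList (l ++ [y]) = PySem.Set.add (PySem.Set.ofList l) y := by
  rw [PySem.Set.ofList_eq_foldl, PySem.Set.ofList_eq_foldl, List.foldl_append]
  rfl

-- B's closed form: the number of distinct words before w's first occurrence is
-- w's index in the first-occurrence (set) order.
theorem prefix_card_eq_index (ws : List String) (w : String) (hw : w ∈ ws) :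
    (PySem.Set.ofList (ws.take (ws.idxOf w))).length = (PySem.Set.ofList ws).idxOf w := by
  induction ws using List.reverseRecOn with
  | nil => cases hw
  | append_singleton l y ih =>
    rw [ofList_append_singleton]
    by_cases hl : w ∈ l
    · have hle : l.idxOf w ≤ l.length := le_of_lt (List.idxOf_lt_length_of_mem hl)
      have htake : (l ++ [y]).take ((l ++ [y]).idxOf w) = l.take (l.idxOf w) := by
        rw [List.idxOf_append_of_mem hl, List.take_append_of_le_length hle]
      rw [htake]
      have hmemo : w ∈ PySem.Set.ofList l := (PySem.Set.mem_ofList l w).mpr hl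
      by_cases hy : y ∈ PySem.Set.ofList l
      · have : PySem.Set.add (PySem.Set.ofList l) y = PySem.Set.ofList l := by
          simp [PySem.Set.add, PySem.Set.contains, hy]
        rw [this]
        exact ih hl
      · have : PySem.Set.add (PySem.Set.ofList l) y = PySem.Set.ofList l ++ [y] := by
          simp [PySem.Set.add, PySem.Set.contains, hy]
        rw [this, List.idxOf_append_of_mem hmemo]
        exact ih hl
    · have hwy : w = y := by
        rcases List.mem_append.mp hw with h | h
        · exact absurd h hl
        · simpa using h
      subst hwy
      have hno : w ∉ PySem.Set.ofList l := fun h => hl ((PySem.Set.mem_ofList l w).mp h)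
      have hadd : PySem.Set.add (PySem.Set.ofList l) w = PySem.Set.ofList l ++ [w] := by
        simp [PySem.Set.add, PySem.Set.contains, hno]
      rw [List.idxOf_append_of_notMem hl, List.idxOf_cons_self, Nat.add_zero, List.take_left,
        hadd, List.idxOf_append_of_notMem hno, List.idxOf_cons_self, Nat.add_zero]

-- ===== VERDICT (by name: the statement is the Claim_ definition above) =====
theorem word_to_label_spec : Claim_equal_word_to_label := by
  intro ws _
  unfold Spec_word_to_label word_to_label word_to_label_alt
  apply List.map_congr_left
  intro w hw
  have hA := foldA_inv ws w [] PySem.Dict.empty (fun v => rfl)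
  have hupd : PySem.Set.update ([] : List String) ws = PySem.Set.ofList ws :=
    (PySem.Set.ofList_eq_foldl ws).symm
  simp only [List.length_nil, Nat.cast_zero] at hA
  rw [hupd] at hA
  have hmemo : w ∈ PySem.Set.ofList ws := (PySem.Set.mem_ofList ws w).mpr hw
  rw [PySem.Dict.getD, hA, index?_of_mem _ _ hmemo, index?_of_mem _ _ hw]
  simp only [Option.map_some, Option.getD_some]
  rw [PySem.List.slice_to_natCast, prefix_card_eq_index ws w hw]
  rfl
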